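-- pv_equiv track=rewrite | github.com/SidneyMe/Island-of-Ireland-Livability-Map-Alpha | noise/extract.py | _filegdb_chunk_windows
-- ===== SOURCE A (Python) =====
-- def _filegdb_chunk_windows(feature_count: int, chunk_count: int) -> list[tuple[int, int]]:
--     feature_count = max(int(feature_count), 0)
--     chunk_count = max(int(chunk_count), 1)
--     if feature_count == 0:
--         return []
--     chunk_count = min(chunk_count, feature_count)
--     base_size, remainder = divmod(feature_count, chunk_count)
--     windows: list[tuple[int, int]] = []
--     offset = 0
--     for chunk_index in range(chunk_count):
--         limit = base_size + (1 if chunk_index < remainder else 0)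
--         windows.append((offset, limit))
--         offset += limit
--     return windows
-- ===== SOURCE B (Python) =====
-- def _filegdb_chunk_windows(feature_count: int, chunk_count: int) -> list[tuple[int, int]]:
--     n = max(int(feature_count), 0)
--     if n == 0:
--         return []
--     k = min(max(int(chunk_count), 1), n)
--     base, rem = divmod(n, k)
--     big = [(i * (base + 1), base + 1) for i in range(rem)]
--     small = [(rem * (base + 1) + j * base, base) for j in range(k - rem)]
--     return big + small
-- ===== Notes on version B (the rewrite author's own statement) =====
-- stated objective: alternative
-- what changed: Instead of a loop threading a running offset and testing i<remainder per element, B builds the result as the concatenation of two independently computed blocks (the remainder large windows, then the small windows), each with its own closed-form offset and no conditional.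
import Mathlib
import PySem

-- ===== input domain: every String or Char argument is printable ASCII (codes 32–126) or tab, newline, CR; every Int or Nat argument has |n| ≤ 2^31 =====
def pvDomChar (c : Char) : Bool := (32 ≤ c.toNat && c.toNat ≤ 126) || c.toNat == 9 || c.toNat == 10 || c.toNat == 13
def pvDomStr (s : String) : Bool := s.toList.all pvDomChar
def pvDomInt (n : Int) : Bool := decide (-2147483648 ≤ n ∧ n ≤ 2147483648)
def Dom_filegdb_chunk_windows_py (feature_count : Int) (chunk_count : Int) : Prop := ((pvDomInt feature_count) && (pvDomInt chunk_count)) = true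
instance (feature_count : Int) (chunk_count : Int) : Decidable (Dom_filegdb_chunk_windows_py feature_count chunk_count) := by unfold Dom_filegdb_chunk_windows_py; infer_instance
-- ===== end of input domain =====

-- B replaces A's running-offset loop with a per-element conditional by the concatenation of two
-- independently computed blocks (large windows, then small windows), each with a closed-form offset
-- and no conditional (objective: alternative).

-- ===== PORT A =====
def filegdb_chunk_windows_py (feature_count : Int) (chunk_count : Int) : List (Int × Int) :=
  let fc := max feature_count 0
  let cc := max chunk_count 1
  if fc = 0 then []
  else
    let cc2 := min cc fc
    let base := PySem.Int.floordiv fc cc2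
    let rem := PySem.Int.mod fc cc2
    let res := (PySem.List.pyRange 0 cc2 1).foldl
      (fun (st : List (Int × Int) × Int) i =>
        let limit := base + (if i < rem then (1 : Int) else 0)
        (st.1 ++ [(st.2, limit)], st.2 + limit)) ([], 0)
    res.1

-- ===== PORT B =====
def filegdb_chunk_windows_py_alt (feature_count : Int) (chunk_count : Int) : List (Int × Int) :=
  let n := max feature_count 0
  if n = 0 then []
  else
    let k := min (max chunk_count 1) n
    let base := PySem.Int.floordiv n k
    let rem := PySem.Int.mod n k
    let big := (PySem.List.pyRange 0 rem 1).map (fun i => (i * (base + 1), base + 1))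
    let small := (PySem.List.pyRange 0 (k - rem) 1).map
      (fun j => (rem * (base + 1) + j * base, base))
    big ++ small

-- ===== PRECONDITION & SPEC =====
def Spec_filegdb_chunk_windows_py (feature_count : Int) (chunk_count : Int) (out : List (Int × Int)) : Prop := out = filegdb_chunk_windows_py_alt feature_count chunk_count
instance (feature_count : Int) (chunk_count : Int) (out : List (Int × Int)) : Decidable (Spec_filegdb_chunk_windows_py feature_count chunk_count out) := by unfold Spec_filegdb_chunk_windows_py; infer_instance

-- ===== CLAIM (what is proved, stated in full; the proofs are below) =====
def Claim_equal_filegdb_chunk_windows_py : Prop := ∀ (feature_count : Int) (chunk_count : Int), Dom_filegdb_chunk_windows_py feature_count chunk_count → Spec_filegdb_chunk_windows_py feature_count chunk_count (filegdb_chunk_windows_py feature_count chunk_count)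

-- ===== LEMMAS AND PROOFS =====

-- Loop invariant: A's fold over range(n) produces exactly the closed-form windows,
-- with final offset n*base + min n rem.
lemma pv_fold_closed_form (base rem : Int) (hrem : 0 ≤ rem) (n : Nat) :
    (PySem.List.pyRange 0 n 1).foldl
      (fun (st : List (Int × Int) × Int) i =>
        (st.1 ++ [(st.2, base + (if i < rem then (1 : Int) else 0))],
         st.2 + (base + (if i < rem then (1 : Int) else 0)))) ([], 0)
    = ((PySem.List.pyRange 0 n 1).map
        (fun i => (i * base + min i rem, base + (if i < rem then (1 : Int) else 0))),
       n * base + min (n : Int) rem) := by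
  induction n with
  | zero => simp; omega
  | succ n ih =>
    have h : PySem.List.pyRange 0 ((n : Nat) + 1 : Nat) 1
        = PySem.List.pyRange 0 n 1 ++ [(n : Int)] := by
      have := PySem.List.pyRange_one_succ_right (a := 0) (b := (n : Int)) (by exact_mod_cast Nat.zero_le n)
      rw [← this]; norm_cast
    rw [h, List.foldl_append, List.map_append, ih]
    simp only [List.foldl_cons, List.foldl_nil, List.map_cons, List.map_nil]
    simp only [Prod.mk.injEq]
    refine ⟨trivial, ?_⟩
    have hmul : (((n : Int)) + 1) * base = (n : Int) * base + base := by ring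
    push_cast
    rw [hmul]
    split_ifs with hc <;> omega

-- The closed-form windows over the full range split into the big block and the small block.
lemma pv_split_blocks (base rem k : Int) (h0 : 0 ≤ rem) (hk : rem ≤ k) :
    (PySem.List.pyRange 0 k 1).map
        (fun i => (i * base + min i rem, base + (if i < rem then (1 : Int) else 0)))
    = (PySem.List.pyRange 0 rem 1).map (fun i => (i * (base + 1), base + 1))
      ++ (PySem.List.pyRange 0 (k - rem) 1).map
          (fun j => (rem * (base + 1) + j * base, base)) := by
  rw [PySem.List.pyRange_one_append 0 rem k h0 hk, List.map_append]
  congr 1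
  · apply List.map_congr_left
    intro i hi
    rw [PySem.List.mem_pyRange_one] at hi
    have h1 : min i rem = i := by omega
    have h2 : i < rem := hi.2
    simp [h1, h2]; ring
  · -- reindex pyRange rem k by j ↦ rem + j
    rw [PySem.List.pyRange_one rem k, PySem.List.pyRange_one 0 (k - rem)]
    simp only [List.map_map, Int.sub_zero]
    apply List.map_congr_left
    intro j hj
    rw [List.mem_range] at hj
    have hjlt : (j : Int) < k - rem := by
      have : (j : Int) < ((k - rem).toNat : Int) := by exact_mod_cast hj
      omega
    have h1 : min (rem + (j : Int)) rem = rem := by omega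
    have h2 : ¬ rem + (j : Int) < rem := by omega
    simp only [Function.comp_apply, Int.zero_add, h1, h2, if_false]
    rw [Prod.mk.injEq]
    exact ⟨by ring, by ring⟩

-- ===== VERDICT (by name: the statement is the Claim_ definition above) =====
theorem filegdb_chunk_windows_py_spec : Claim_equal_filegdb_chunk_windows_py := by
  intro fc0 cc0 _
  unfold Spec_filegdb_chunk_windows_py filegdb_chunk_windows_py filegdb_chunk_windows_py_alt
  by_cases h0 : max fc0 0 = 0
  · simp [h0]
  · simp only [h0, if_false]
    set cc2 := min (max cc0 1) (max fc0 0) with hcc2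
    have hpos : 0 < cc2 := by
      have : 0 < max fc0 0 := lt_of_le_of_ne (le_max_right _ _) (Ne.symm h0)
      simp [hcc2]; omega
    have hnat : cc2 = ((cc2.toNat : Nat) : Int) := by omega
    have hrem0 : 0 ≤ PySem.Int.mod (max fc0 0) cc2 := PySem.Int.mod_nonneg _ hpos
    have hremk : PySem.Int.mod (max fc0 0) cc2 ≤ cc2 :=
      le_of_lt (PySem.Int.mod_lt _ hpos)
    have hrem0' : 0 ≤ PySem.Int.mod (max fc0 0) ((cc2.toNat : Nat) : Int) := hnat ▸ hrem0
    rw [hnat, pv_fold_closed_form _ _ hrem0', ← hnat, pv_split_blocks _ _ _ hrem0 hremk]
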